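-- pv_equiv track=rewrite | github.com/NAN-Xiao/excel-graph-builder | indexer/discovery/abbreviation.py | _clean_column_name
-- ===== SOURCE A (Python) =====
-- def _clean_column_name(col_name: str) -> str:
--     """清理列名（去掉后缀）"""
--     suffixes = ['_id', '_code', '_key', '_no', '_num', '_idx', '_ref', '_type']
--     clean = col_name.lower()
--     for suffix in suffixes:
--         if clean.endswith(suffix):
--             clean = clean[:-len(suffix)]
--             break
--     return clean
-- ===== SOURCE B (Python) =====
-- _TOKENS = {'id', 'code', 'key', 'no', 'num', 'idx', 'ref', 'type'}
--
-- def _clean_column_name(col_name: str) -> str: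
--     """Strip a known suffix: split on the LAST underscore and test the tail token."""
--     clean = col_name.lower()
--     head, sep, tail = clean.rpartition('_')
--     if sep and tail in _TOKENS:
--         return head
--     return clean
-- ===== Notes on version B (the rewrite author's own statement) =====
-- stated objective: alternative
-- what changed: Instead of scanning eight suffixes with endswith and slicing, B rpartitions the lowercased name at its last underscore once and strips it when the trailing token is in a constant set.
import Mathlib
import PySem

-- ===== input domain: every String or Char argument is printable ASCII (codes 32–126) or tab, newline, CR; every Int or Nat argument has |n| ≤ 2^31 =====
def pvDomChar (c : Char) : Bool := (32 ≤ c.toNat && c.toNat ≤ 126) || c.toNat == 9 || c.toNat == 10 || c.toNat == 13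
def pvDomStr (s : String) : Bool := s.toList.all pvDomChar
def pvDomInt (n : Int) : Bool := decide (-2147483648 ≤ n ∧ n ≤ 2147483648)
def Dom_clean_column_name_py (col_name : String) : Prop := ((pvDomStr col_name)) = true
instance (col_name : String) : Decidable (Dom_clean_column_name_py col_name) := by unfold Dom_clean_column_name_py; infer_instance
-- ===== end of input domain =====

-- B replaces A's eight-suffix endswith loop by one rpartition at the last underscore plus a set
-- membership test on the trailing token (objective: alternative; same cost, different strategy).


-- ===== PORT A =====
-- 'for suffix in suffixes: if clean.endswith(suffix): clean = clean[:-len(suffix)]; break'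
def pvALoop : List (List Char) → List Char → List Char
  | [], clean => clean
  | suf :: rest, clean =>
      if PySem.Chars.endswith clean suf then
        PySem.List.slice clean none (some (-(suf.length : Int)))   -- clean[:-len(suffix)], then break
      else pvALoop rest clean

def clean_column_name_py (col_name : String) : String :=
  let suffixes : List (List Char) :=
    [['_','i','d'], ['_','c','o','d','e'], ['_','k','e','y'], ['_','n','o'],
     ['_','n','u','m'], ['_','i','d','x'], ['_','r','e','f'], ['_','t','y','p','e']]
  String.ofList (pvALoop suffixes (PySem.Chars.lower col_name.toList))

-- ===== PORT B =====
-- hand port of str.rpartition('_') (PySem has none): scan for the LAST '_';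
-- none = separator absent (Python's ('', '', s) case), some (head, tail) = the split.
def pvRpart : List Char → Option (List Char × List Char)
  | [] => none
  | c :: cs =>
      match pvRpart cs with
      | some (h, t) => some (c :: h, t)
      | none => if c = '_' then some ([], cs) else none

def pvTokens : List (List Char) :=
  [['i','d'], ['c','o','d','e'], ['k','e','y'], ['n','o'],
   ['n','u','m'], ['i','d','x'], ['r','e','f'], ['t','y','p','e']]

def clean_column_name_py_alt (col_name : String) : String :=
  let clean := PySem.Chars.lower col_name.toList
  match pvRpart clean with
  | some (h, t) => if t ∈ pvTokens then String.ofList h else String.ofList clean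
  | none => String.ofList clean

-- ===== PRECONDITION & SPEC =====
def Spec_clean_column_name_py (col_name : String) (out : String) : Prop := out = clean_column_name_py_alt col_name
instance (col_name : String) (out : String) : Decidable (Spec_clean_column_name_py col_name out) := by unfold Spec_clean_column_name_py; infer_instance

-- ===== CLAIM (what is proved, stated in full; the proofs are below) =====
def Claim_equal_clean_column_name_py : Prop := ∀ (col_name : String), Dom_clean_column_name_py col_name → Spec_clean_column_name_py col_name (clean_column_name_py col_name)

-- ===== LEMMAS AND PROOFS =====

-- pvRpart = none exactly when there is no '_'
theorem pvRpart_eq_none : ∀ {l : List Char}, pvRpart l = none → '_' ∉ l := by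
  intro l
  induction l with
  | nil => intro _; simp
  | cons c cs ih =>
      intro h
      cases hr : pvRpart cs with
      | some p => obtain ⟨a, b⟩ := p; simp [pvRpart, hr] at h
      | none =>
          by_cases hc : c = '_'
          · simp [pvRpart, hr, hc] at h
          · intro hm
            rcases List.mem_cons.1 hm with e | e
            · exact hc e.symm
            · exact ih hr e

-- pvRpart splits at the LAST '_'
theorem pvRpart_eq_some : ∀ {l h t : List Char}, pvRpart l = some (h, t) →
    l = h ++ '_' :: t ∧ '_' ∉ t := by
  intro l
  induction l with
  | nil => intro h t hr; simp [pvRpart] at hr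
  | cons c cs ih =>
      intro h t hr
      cases hcs : pvRpart cs with
      | some p =>
          obtain ⟨a, b⟩ := p
          simp only [pvRpart, hcs, Option.some.injEq, Prod.mk.injEq] at hr
          obtain ⟨h1, h2⟩ := hr
          obtain ⟨e, hnt⟩ := ih hcs
          subst h1 h2
          exact ⟨by simp [e], hnt⟩
      | none =>
          simp only [pvRpart, hcs] at hr
          split_ifs at hr with hc
          · simp only [Option.some.injEq, Prod.mk.injEq] at hr
            obtain ⟨h1, h2⟩ := hr
            subst h1 h2 hc
            exact ⟨rfl, pvRpart_eq_none hcs⟩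

-- on a string whose part after the last '_' is t (no '_' in t or tok),
-- endswith '_'::tok holds exactly for tok = t
theorem endswith_uniq (h t tok : List Char) (ht : '_' ∉ t) (htok : '_' ∉ tok) :
    PySem.Chars.endswith (h ++ '_' :: t) ('_' :: tok) = true ↔ tok = t := by
  rw [PySem.Chars.endswith_iff]
  constructor
  · intro hs
    have hs' : ('_' :: t : List Char) <:+ h ++ '_' :: t :=
      List.suffix_append_of_suffix (List.suffix_refl _)
    rcases List.suffix_or_suffix_of_suffix hs hs' with h1 | h1
    · rcases (List.suffix_cons_iff).1 h1 with he | h2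
      · exact (List.cons.injEq .. ▸ he).2
      · exact absurd (h2.subset (by simp)) ht
    · rcases (List.suffix_cons_iff).1 h1 with he | h2
      · exact ((List.cons.injEq .. ▸ he).2).symm
      · exact absurd (h2.subset (by simp)) htok
  · intro he; subst he; exact List.suffix_append_of_suffix (List.suffix_refl _)

theorem endswith_eq_decide (h t tok : List Char) (ht : '_' ∉ t) (htok : '_' ∉ tok) :
    PySem.Chars.endswith (h ++ '_' :: t) ('_' :: tok) = decide (tok = t) := by
  by_cases he : tok = t
  · subst he
    simp [(endswith_uniq _ _ _ ht ht).2 rfl]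
  · rw [decide_eq_false he]
    exact Bool.eq_false_iff.mpr (fun hc => he ((endswith_uniq h t tok ht htok).1 hc))

-- no suffix matches when the string has no '_'
theorem endswith_no_underscore (l tok : List Char) (hl : '_' ∉ l) :
    PySem.Chars.endswith l ('_' :: tok) = false := by
  refine Bool.eq_false_iff.mpr (fun hc => ?_)
  exact hl (((PySem.Chars.endswith_iff l ('_' :: tok)).1 hc).subset (by simp))

-- the core equivalence on char lists
theorem core_eq (l : List Char) :
    pvALoop [['_','i','d'], ['_','c','o','d','e'], ['_','k','e','y'], ['_','n','o'],
      ['_','n','u','m'], ['_','i','d','x'], ['_','r','e','f'], ['_','t','y','p','e']] l =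
    (match pvRpart l with
     | some (h, t) => if t ∈ pvTokens then h else l
     | none => l) := by
  rcases hr : pvRpart l with _ | ⟨h, t⟩
  · have hnu := pvRpart_eq_none hr
    simp [pvALoop, endswith_no_underscore _ _ hnu]
  · obtain ⟨he, hnt⟩ := pvRpart_eq_some hr
    subst he
    simp only [pvALoop,
      endswith_eq_decide h t ['i','d'] hnt (by decide),
      endswith_eq_decide h t ['c','o','d','e'] hnt (by decide),
      endswith_eq_decide h t ['k','e','y'] hnt (by decide),
      endswith_eq_decide h t ['n','o'] hnt (by decide),
      endswith_eq_decide h t ['n','u','m'] hnt (by decide),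
      endswith_eq_decide h t ['i','d','x'] hnt (by decide),
      endswith_eq_decide h t ['r','e','f'] hnt (by decide),
      endswith_eq_decide h t ['t','y','p','e'] hnt (by decide)]
    by_cases hmem : t ∈ pvTokens
    · simp only [pvTokens, List.mem_cons, List.not_mem_nil, or_false] at hmem
      rcases hmem with e | e | e | e | e | e | e | e <;> subst e <;>
        simp [PySem.List.slice_to_neg_ofNat (h ++ ['_','i','d']) 3 (by norm_num),
              PySem.List.slice_to_neg_ofNat (h ++ ['_','c','o','d','e']) 5 (by norm_num),
              PySem.List.slice_to_neg_ofNat (h ++ ['_','k','e','y']) 4 (by norm_num),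
              PySem.List.slice_to_neg_ofNat (h ++ ['_','n','o']) 3 (by norm_num),
              PySem.List.slice_to_neg_ofNat (h ++ ['_','n','u','m']) 4 (by norm_num),
              PySem.List.slice_to_neg_ofNat (h ++ ['_','i','d','x']) 4 (by norm_num),
              PySem.List.slice_to_neg_ofNat (h ++ ['_','r','e','f']) 4 (by norm_num),
              PySem.List.slice_to_neg_ofNat (h ++ ['_','t','y','p','e']) 5 (by norm_num),
              List.length_append, pvTokens]
    · have hne : ∀ tok ∈ pvTokens, tok ≠ t := fun tok hm e => hmem (e ▸ hm)
      simp [hmem,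
        decide_eq_false (hne ['i','d'] (by simp [pvTokens])),
        decide_eq_false (hne ['c','o','d','e'] (by simp [pvTokens])),
        decide_eq_false (hne ['k','e','y'] (by simp [pvTokens])),
        decide_eq_false (hne ['n','o'] (by simp [pvTokens])),
        decide_eq_false (hne ['n','u','m'] (by simp [pvTokens])),
        decide_eq_false (hne ['i','d','x'] (by simp [pvTokens])),
        decide_eq_false (hne ['r','e','f'] (by simp [pvTokens])),
        decide_eq_false (hne ['t','y','p','e'] (by simp [pvTokens]))]

-- ===== VERDICT (by name: the statement is the Claim_ definition above) =====
theorem clean_column_name_py_spec : Claim_equal_clean_column_name_py := by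
  intro s _
  unfold Spec_clean_column_name_py clean_column_name_py clean_column_name_py_alt
  have hc := core_eq (PySem.Chars.lower s.toList)
  rcases hr : pvRpart (PySem.Chars.lower s.toList) with _ | ⟨h, t⟩ <;>
    rw [hr] at hc <;> simp only [hc, hr]
  split_ifs <;> rfl
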